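-- pv_equiv track=rewrite | github.com/open-traffic-generator/snappi-ixnetwork | ixnetwork_open_traffic_generator/trafficitem.py | _convert_string_to_regex
-- ===== SOURCE A (Python) =====
-- def _convert_string_to_regex(names):
--     ret_list = []
--     for n in names:
--         ret_list.append(
--             n.replace('(', '\\(').replace(')', '\\)')
--                 .replace('[', '\\[').replace(']', '\\]')
--                 .replace('.', '\\.').replace('*', '\\*')
--                 .replace('+', '\\+').replace('?', '\\?')
--                 .replace('{', '\\{').replace('}', '\\}')
--         )
--     return ret_list
-- ===== SOURCE B (Python) =====
-- _SPECIALS = set('()[].*+?{}')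
--
-- def _convert_string_to_regex(names):
--     return [''.join('\\' + c if c in _SPECIALS else c for c in n) for n in names]
-- ===== Notes on version B (the rewrite author's own statement) =====
-- stated objective: simpler
-- what changed: Replaces the explicit loop with ten chained full-string .replace() passes per name by a single per-character scan with a set membership test, joining '\'+c for special characters.
import Mathlib
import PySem

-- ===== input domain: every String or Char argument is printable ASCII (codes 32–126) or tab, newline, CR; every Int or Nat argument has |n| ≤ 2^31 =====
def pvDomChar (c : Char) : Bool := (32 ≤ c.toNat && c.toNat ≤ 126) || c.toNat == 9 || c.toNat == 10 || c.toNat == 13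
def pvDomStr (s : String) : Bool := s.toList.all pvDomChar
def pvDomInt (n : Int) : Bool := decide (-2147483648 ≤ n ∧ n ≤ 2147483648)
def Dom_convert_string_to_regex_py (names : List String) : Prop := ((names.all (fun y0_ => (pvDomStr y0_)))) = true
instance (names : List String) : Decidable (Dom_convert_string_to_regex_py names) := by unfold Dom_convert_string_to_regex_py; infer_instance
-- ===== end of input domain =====

-- B replaces A's ten chained full-string .replace passes per name by a single per-character
-- scan with a membership test; same return value, no side effects involved.

-- ===== PORT A =====
-- literal transliteration: a loop appending to ret_list, ten nested replaces per name
def convert_string_to_regex_py (names : List String) : List String :=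
  names.foldl (fun ret_list n =>
    ret_list ++
      [PySem.Str.replace (PySem.Str.replace (PySem.Str.replace (PySem.Str.replace
        (PySem.Str.replace (PySem.Str.replace (PySem.Str.replace (PySem.Str.replace
        (PySem.Str.replace (PySem.Str.replace n "(" "\\(") ")" "\\)")
        "[" "\\[") "]" "\\]") "." "\\.") "*" "\\*") "+" "\\+") "?" "\\?")
        "{" "\\{") "}" "\\}"]) []

-- ===== PORT B =====
-- the set of special characters (Source B's _SPECIALS)
def pvSpecials : List Char := ['(', ')', '[', ']', '.', '*', '+', '?', '{', '}']

-- one per-character pass: ''.join('\\' + c if c in _SPECIALS else c for c in n)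
def convert_string_to_regex_py_alt (names : List String) : List String :=
  names.map (fun n =>
    String.ofList (n.toList.flatMap (fun c =>
      if pvSpecials.contains c then ['\\', c] else [c])))

-- ===== PRECONDITION & SPEC =====
def Spec_convert_string_to_regex_py (names : List String) (out : List String) : Prop := out = convert_string_to_regex_py_alt names
instance (names : List String) (out : List String) : Decidable (Spec_convert_string_to_regex_py names out) := by unfold Spec_convert_string_to_regex_py; infer_instance

-- ===== CLAIM (what is proved, stated in full; the proofs are below) =====
def Claim_equal_convert_string_to_regex_py : Prop := ∀ (names : List String), Dom_convert_string_to_regex_py names → Spec_convert_string_to_regex_py names (convert_string_to_regex_py names)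

-- ===== LEMMAS AND PROOFS =====

-- escaping restricted to the specials processed so far
def escPartial (T : List Char) (c : Char) : List Char :=
  if T.contains c then ['\\', c] else [c]

-- replace with a single-character pattern is a per-character flatMap
theorem go_single (p : Char) (r : List Char) (l : List Char) :
    ∀ (fuel : Nat) (acc : List Char), l.length ≤ fuel →
    PySem.Chars.replace.go [p] r fuel l acc
      = acc.reverse ++ l.flatMap (fun c => if c = p then r else [c]) := by
  induction l with
  | nil =>
    intro fuel acc _
    cases fuel <;> simp [PySem.Chars.replace.go]
  | cons c t ih =>
    intro fuel acc h
    cases fuel with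
    | zero => simp at h
    | succ fuel =>
      simp only [PySem.Chars.replace.go]
      by_cases hc : c = p
      · subst hc
        have hpre : List.isPrefixOf [c] (c :: t) = true := by
          simp [List.isPrefixOf]
        rw [if_pos hpre]
        simp only [List.length_cons, List.length_nil, List.drop_succ_cons, List.drop_zero]
        simp only [List.length_cons] at h
        rw [ih fuel _ (by omega)]
        simp
      · have hpre : List.isPrefixOf [p] (c :: t) = false := by
          simp [List.isPrefixOf]; exact fun h' => hc h'.symm
        rw [if_neg (by simp [hpre])]
        simp only [List.length_cons] at h
        rw [ih fuel _ (by omega)]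
        simp [hc]

theorem replace_single (l : List Char) (p : Char) (r : List Char) :
    PySem.Chars.replace l [p] r = l.flatMap (fun c => if c = p then r else [c]) := by
  simp only [PySem.Chars.replace, List.isEmpty_cons, if_false, Bool.false_eq_true]
  simpa using go_single p r l l.length [] le_rfl

-- applying one more single-character escape pass on an already partially escaped string
theorem push_special (cs : List Char) (T : List Char) (p : Char)
    (hp1 : T.contains p = false) (hp2 : p ≠ '\\') :
    (cs.flatMap (escPartial T)).flatMap (fun d => if d = p then ['\\', p] else [d])
      = cs.flatMap (escPartial (T ++ [p])) := by
  induction cs with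
  | nil => simp
  | cons c t ih =>
    simp only [List.flatMap_cons, List.flatMap_append, ih]
    congr 1
    unfold escPartial
    by_cases hc : T.contains c = true
    · have hne : c ≠ p := by
        intro h; subst h; rw [hc] at hp1; exact absurd hp1 (by simp)
      rw [if_pos hc, if_pos (by simp only [List.contains_append, hc, Bool.true_or])]
      simp only [List.flatMap_cons, List.flatMap_nil, List.append_nil]
      rw [if_neg (Ne.symm hp2), if_neg hne]
      rfl
    · by_cases hcp : c = p
      · subst hcp
        rw [if_neg hc, if_pos (by simp [List.contains_append])]
        simp
      · rw [if_neg hc, if_neg (by simp only [List.contains_append, hc, List.contains_cons,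
          List.contains_nil, Bool.or_false, Bool.false_or, beq_iff_eq]; exact hcp)]
        simp [hcp]

theorem escPartial_base (p : Char) :
    (fun c => if c = p then ['\\', p] else [c]) = escPartial [p] := by
  funext c
  unfold escPartial
  by_cases h : c = p
  · subst h; simp
  · simp [h, Ne.symm h]

-- A's ten chained replaces on one string equal B's single per-character pass
theorem chain_eq (l : List Char) :
    PySem.Chars.replace (PySem.Chars.replace (PySem.Chars.replace (PySem.Chars.replace
      (PySem.Chars.replace (PySem.Chars.replace (PySem.Chars.replace (PySem.Chars.replace
      (PySem.Chars.replace (PySem.Chars.replace l ['('] ['\\', '(']) [')'] ['\\', ')'])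
      ['['] ['\\', '[']) [']'] ['\\', ']']) ['.'] ['\\', '.']) ['*'] ['\\', '*'])
      ['+'] ['\\', '+']) ['?'] ['\\', '?']) ['{'] ['\\', '{']) ['}'] ['\\', '}']
    = l.flatMap (fun c => if pvSpecials.contains c then ['\\', c] else [c]) := by
  simp only [replace_single]
  rw [escPartial_base '(']
  rw [push_special l ['('] ')' (by decide) (by decide)]
  simp only [List.cons_append, List.nil_append]
  rw [push_special l ['(', ')'] '[' (by decide) (by decide)]
  simp only [List.cons_append, List.nil_append]
  rw [push_special l ['(', ')', '['] ']' (by decide) (by decide)]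
  simp only [List.cons_append, List.nil_append]
  rw [push_special l ['(', ')', '[', ']'] '.' (by decide) (by decide)]
  simp only [List.cons_append, List.nil_append]
  rw [push_special l ['(', ')', '[', ']', '.'] '*' (by decide) (by decide)]
  simp only [List.cons_append, List.nil_append]
  rw [push_special l ['(', ')', '[', ']', '.', '*'] '+' (by decide) (by decide)]
  simp only [List.cons_append, List.nil_append]
  rw [push_special l ['(', ')', '[', ']', '.', '*', '+'] '?' (by decide) (by decide)]
  simp only [List.cons_append, List.nil_append]
  rw [push_special l ['(', ')', '[', ']', '.', '*', '+', '?'] '{' (by decide) (by decide)]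
  simp only [List.cons_append, List.nil_append]
  rw [push_special l ['(', ')', '[', ']', '.', '*', '+', '?', '{'] '}' (by decide) (by decide)]
  simp only [List.cons_append, List.nil_append]
  rfl

theorem foldl_append_map {α β : Type} (l : List α) (f : α → β) (acc : List β) :
    l.foldl (fun r x => r ++ [f x]) acc = acc ++ l.map f := by
  induction l generalizing acc with
  | nil => simp
  | cons x t ih => simp [List.foldl_cons, ih]

-- ===== VERDICT (by name: the statement is the Claim_ definition above) =====
theorem convert_string_to_regex_py_spec : Claim_equal_convert_string_to_regex_py := by
  intro names _
  unfold Spec_convert_string_to_regex_py convert_string_to_regex_py convert_string_to_regex_py_alt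
  rw [foldl_append_map]
  simp only [List.nil_append]
  apply List.map_congr_left
  intro n _
  simp only [PySem.Str.replace, String.toList_ofList]
  exact congrArg String.ofList (chain_eq n.toList)
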